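-- pv_equiv track=rewrite | github.com/JohnFinn000/AdventOfCode | 2019/6.py | find_path_to_root
-- ===== SOURCE A (Python) =====
-- def find_path_to_root(graph, planet, root):
--   path = [planet]
--   if planet == root:
--     return path
--
--   for orbitee in graph[planet]:
--     new_path = find_path_to_root(graph, orbitee, root)
--     if new_path:
--       path.extend(new_path)
--       break
--
--   if path:
--     return path
--   else:
--     return None
-- ===== SOURCE B (Python) =====
-- def find_path_to_root(graph, planet, root):
--     # Iterative: follow the first orbitee down the chain (A's recursion with
--     # its unconditional `break` does exactly this), collecting the path.
--     path = [planet]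
--     while planet != root:
--         orbitees = graph[planet]
--         if not orbitees:
--             break
--         planet = orbitees[0]
--         path.append(planet)
--     return path
-- ===== Notes on version B (the rewrite author's own statement) =====
-- stated objective: simpler
-- what changed: Replaced A's recursion with a for-loop-and-break (whose break always fires on the first orbitee) by a plain iterative while-loop that follows graph[planet][0] down the chain, appending to one path list; no recursion, no list concatenations.
import Mathlib
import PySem

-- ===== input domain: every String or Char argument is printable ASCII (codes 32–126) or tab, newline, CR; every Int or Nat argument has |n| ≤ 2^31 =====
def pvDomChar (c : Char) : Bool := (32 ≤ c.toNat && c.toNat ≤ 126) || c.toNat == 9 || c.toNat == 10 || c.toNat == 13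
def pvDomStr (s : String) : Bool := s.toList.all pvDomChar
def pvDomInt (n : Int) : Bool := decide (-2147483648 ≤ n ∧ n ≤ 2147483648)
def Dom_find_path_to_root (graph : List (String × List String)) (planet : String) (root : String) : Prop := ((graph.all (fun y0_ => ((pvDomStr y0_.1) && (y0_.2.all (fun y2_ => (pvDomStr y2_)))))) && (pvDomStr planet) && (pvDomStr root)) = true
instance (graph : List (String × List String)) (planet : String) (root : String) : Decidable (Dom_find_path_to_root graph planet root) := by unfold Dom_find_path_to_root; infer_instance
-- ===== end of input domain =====

-- B replaces A's recursion (whose break always fires on the first orbitee) by a plain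
-- iterative while-loop following graph[planet][0]; objective: simpler.

-- ===== PORT A =====
-- Literal port of A's recursion; fuel bounds the recursion depth (Python's recursion is
-- unbounded and raises RecursionError on cycles — those inputs are outside Pre_, and the
-- fuel graph.length+1 never runs out inside Pre_). none = exception (KeyError / depth).
-- the `for orbitee in graph[planet]` loop, then `if path: return path else: return None`;
-- `f` is the recursive call (structural recursion on fuel, so the kernel can evaluate it)
def pvLoopA (f : String → Option (List String)) : List String → List String → Option (List String)
  | [], path => if path = [] then none else some path
  | orbitee :: rest, path =>
    match f orbitee with
    | none => none   -- exception propagates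
    | some new_path =>
      if new_path = [] then pvLoopA f rest path   -- `if new_path:` false: continue
      else if path ++ new_path = [] then none else some (path ++ new_path)   -- extend, break, `if path:`

def pvFindA : Nat → List (String × List String) → String → String → Option (List String)
  | 0, _, _, _ => none
  | n+1, graph, planet, root =>
    let path := [planet]
    if planet = root then some path
    else
      match (PySem.Dict.mk graph).get? planet with
      | none => none   -- KeyError: graph[planet]
      | some orbitees => pvLoopA (fun orbitee => pvFindA n graph orbitee root) orbitees path

def find_path_to_root (graph : List (String × List String)) (planet : String) (root : String) : Option (List String) :=
  pvFindA (graph.length + 1) graph planet root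

-- ===== PORT B =====
-- Literal port of B's while-loop; same fuel convention (exhaustion = non-termination).
def pvLoopB : Nat → List (String × List String) → String → String → List String → Option (List String)
  | 0, _, _, _, _ => none
  | n+1, graph, root, planet, path =>
    if planet = root then some path
    else
      match (PySem.Dict.mk graph).get? planet with
      | none => none   -- KeyError: graph[planet]
      | some [] => some path   -- `if not orbitees: break`
      | some (h :: _) => pvLoopB n graph root h (path ++ [h])

def find_path_to_root_alt (graph : List (String × List String)) (planet : String) (root : String) : Option (List String) :=
  pvLoopB (graph.length + 1) graph root planet [planet]

-- ===== PRECONDITION & SPEC =====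
-- pvStops says the first-orbitee chain from p reaches root or a dead end (an empty orbit
-- list) within n lookups, every visited non-root node being a key of graph.
def pvStops (graph : List (String × List String)) (root : String) : Nat → String → Bool
  | 0, p => p == root || (PySem.Dict.mk graph).get? p == some []
  | n+1, p =>
    p == root ||
      match (PySem.Dict.mk graph).get? p with
      | some [] => true
      | some (h :: _) => pvStops graph root n h
      | none => false

-- Pre_ excludes exactly the inputs where Python A raises: KeyError when the chain hits a
-- planet missing from graph, RecursionError when it cycles (a terminating chain visits at
-- most graph.length distinct keys, so fuel graph.length suffices). A returns on all of Pre_.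
def Pre_find_path_to_root (graph : List (String × List String)) (planet : String) (root : String) : Prop :=
  pvStops graph root graph.length planet = true
instance (graph : List (String × List String)) (planet : String) (root : String) : Decidable (Pre_find_path_to_root graph planet root) := by unfold Pre_find_path_to_root; infer_instance

def pvWitness_find_path_to_root : (List (String × List String)) × String × String :=
  ([("a", ["b"]), ("b", [])], "a", "r")

def Spec_find_path_to_root (graph : List (String × List String)) (planet : String) (root : String) (out : Option (List String)) : Prop := out = find_path_to_root_alt graph planet root
instance (graph : List (String × List String)) (planet : String) (root : String) (out : Option (List String)) : Decidable (Spec_find_path_to_root graph planet root out) := by unfold Spec_find_path_to_root; infer_instance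

-- ===== CLAIM (what is proved, stated in full; the proofs are below) =====
def Claim_equal_find_path_to_root : Prop := ∀ (graph : List (String × List String)) (planet : String) (root : String), Dom_find_path_to_root graph planet root → Pre_find_path_to_root graph planet root → Spec_find_path_to_root graph planet root (find_path_to_root graph planet root)

-- ===== LEMMAS AND PROOFS =====

-- the tail of the path (everything after the starting planet), as a total function
def pvTail (graph : List (String × List String)) (root : String) : Nat → String → List String
  | 0, _ => []
  | n+1, p =>
    if p = root then []
    else
      match (PySem.Dict.mk graph).get? p with
      | some (h :: _) => h :: pvTail graph root n h
      | _ => []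

theorem pvFindA_eq (graph : List (String × List String)) (root : String) :
    ∀ (n : Nat) (p : String), pvStops graph root n p = true →
      pvFindA (n+1) graph p root = some (p :: pvTail graph root n p) := by
  intro n
  induction n with
  | zero =>
    intro p hs
    simp only [pvStops, Bool.or_eq_true, beq_iff_eq] at hs
    by_cases hr : p = root
    · simp [pvFindA, pvTail, hr]
    · rcases hs with hs | hs
      · exact absurd hs hr
      · simp [pvFindA, pvTail, hr, hs, pvLoopA]
  | succ n ih =>
    intro p hs
    simp only [pvStops, Bool.or_eq_true, beq_iff_eq] at hs
    by_cases hr : p = root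
    · simp [pvFindA, pvTail, hr]
    · rcases hs with hs | hs
      · exact absurd hs hr
      · rcases hg : (PySem.Dict.mk graph).get? p with _ | ⟨_ | ⟨h, t⟩⟩ <;> rw [hg] at hs
        · exact absurd hs (by simp)
        · simp [pvFindA, pvTail, hr, hg, pvLoopA]
        · have hrec := ih h hs
          have hstep : pvFindA (n+1+1) graph p root
              = pvLoopA (fun orbitee => pvFindA (n+1) graph orbitee root) (h :: t) [p] := by
            rw [pvFindA]; simp [hr, hg]
          rw [hstep, pvLoopA]
          simp [hrec, pvTail, hr, hg]

theorem pvLoopB_eq (graph : List (String × List String)) (root : String) :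
    ∀ (n : Nat) (p : String) (path : List String), pvStops graph root n p = true →
      pvLoopB (n+1) graph root p path = some (path ++ pvTail graph root n p) := by
  intro n
  induction n with
  | zero =>
    intro p path hs
    simp only [pvStops, Bool.or_eq_true, beq_iff_eq] at hs
    by_cases hr : p = root
    · simp [pvLoopB, pvTail, hr]
    · rcases hs with hs | hs
      · exact absurd hs hr
      · simp [pvLoopB, pvTail, hr, hs]
  | succ n ih =>
    intro p path hs
    simp only [pvStops, Bool.or_eq_true, beq_iff_eq] at hs
    by_cases hr : p = root
    · simp [pvLoopB, pvTail, hr]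
    · rcases hs with hs | hs
      · exact absurd hs hr
      · rcases hg : (PySem.Dict.mk graph).get? p with _ | ⟨_ | ⟨h, t⟩⟩ <;> rw [hg] at hs
        · exact absurd hs (by simp)
        · simp [pvLoopB, pvTail, hr, hg]
        · have hstep : pvLoopB (n+1+1) graph root p path = pvLoopB (n+1) graph root h (path ++ [h]) := by
            rw [pvLoopB]; simp [hr, hg]
          rw [hstep, ih h (path ++ [h]) hs]
          simp [pvTail, hr, hg]

-- ===== VERDICT (by name: the statement is the Claim_ definition above) =====
theorem find_path_to_root_spec : Claim_equal_find_path_to_root := by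
  intro graph planet root _ hpre
  unfold Spec_find_path_to_root find_path_to_root find_path_to_root_alt
  rw [pvFindA_eq graph root graph.length planet hpre,
      pvLoopB_eq graph root graph.length planet [planet] hpre]
  simp
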